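-- pv_equiv track=rewrite | github.com/98coco/cs30_fall2022 | comp sci discussions/Midterm 2 Paper Practice .py | helper
-- ===== SOURCE A (Python) =====
-- def helper(l, preSum):
--     if l == []:
--         return preSum
--     else:
--         head = l[0] #1
--         tail = l[1:] #3,6,5
--         if preSum % 2 == 0:  #if presum is even
--             return helper(tail, preSum + head)
--         else:
--             return helper(tail, preSum + 1)
-- ===== SOURCE B (Python) =====
-- def helper(l, preSum):
--     s = preSum
--     for x in l:
--         s += x if s % 2 == 0 else 1
--     return s
-- ===== Notes on version B (the rewrite author's own statement) =====
-- stated objective: faster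
-- what changed: Replaces the recursion with per-call list slicing by a single iterative loop over the list maintaining a running sum.
import Mathlib
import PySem

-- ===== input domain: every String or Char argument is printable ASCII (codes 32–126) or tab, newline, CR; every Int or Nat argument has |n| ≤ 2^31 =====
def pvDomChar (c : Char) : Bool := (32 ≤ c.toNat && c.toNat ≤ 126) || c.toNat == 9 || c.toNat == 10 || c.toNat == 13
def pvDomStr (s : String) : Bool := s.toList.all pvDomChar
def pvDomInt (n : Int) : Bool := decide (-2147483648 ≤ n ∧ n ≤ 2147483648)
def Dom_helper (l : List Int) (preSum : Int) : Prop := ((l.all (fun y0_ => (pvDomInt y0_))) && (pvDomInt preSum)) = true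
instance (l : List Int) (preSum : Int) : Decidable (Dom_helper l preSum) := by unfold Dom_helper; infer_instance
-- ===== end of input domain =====

-- B replaces A's recursion-with-slicing by one iterative pass with a running sum (asymptotically faster).

-- ===== PORT A =====
-- A recurses: empty list returns preSum; else head = l[0], tail = l[1:],
-- recurse on tail adding head if preSum even, else adding 1.
def helper (l : List Int) (preSum : Int) : Int :=
  match l with
  | [] => preSum
  | head :: tail =>
      if PySem.Int.mod preSum 2 = 0 then helper tail (preSum + head)
      else helper tail (preSum + 1)

-- ===== PORT B =====
-- B folds once over the list with accumulator s.
def helper_alt (l : List Int) (preSum : Int) : Int :=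
  l.foldl (fun s x => s + (if PySem.Int.mod s 2 = 0 then x else 1)) preSum

-- ===== PRECONDITION & SPEC =====
def Spec_helper (l : List Int) (preSum : Int) (out : Int) : Prop := out = helper_alt l preSum
instance (l : List Int) (preSum : Int) (out : Int) : Decidable (Spec_helper l preSum out) := by unfold Spec_helper; infer_instance

-- ===== CLAIM (what is proved, stated in full; the proofs are below) =====
def Claim_equal_helper : Prop := ∀ (l : List Int) (preSum : Int), Dom_helper l preSum → Spec_helper l preSum (helper l preSum)

-- ===== LEMMAS AND PROOFS =====
theorem helper_eq_alt (l : List Int) (preSum : Int) : helper l preSum = helper_alt l preSum := by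
  induction l generalizing preSum with
  | nil => simp [helper, helper_alt]
  | cons h t ih =>
      simp only [helper, helper_alt, List.foldl_cons]
      split_ifs with hp <;> simpa [helper_alt, hp] using ih _

-- ===== VERDICT (by name: the statement is the Claim_ definition above) =====
theorem helper_spec : Claim_equal_helper := by
  intro l preSum _
  exact helper_eq_alt l preSum
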